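-- pv_equiv track=rewrite | github.com/amikael/coding | conllenc2.7.py | compute_deps
-- ===== SOURCE A (Python) =====
-- def compute_deps(head,n):
--     deps = {}
--     for i in range(0,n+1):
--         deps[i] = set([])
--     for i in head:
--         if i > 0:
--             j = head[i]
--             deps[j].add(i)
--     for i in deps:
--         deps[i] = sorted(list(deps[i]))
--     return deps
-- ===== SOURCE B (Python) =====
-- def compute_deps(head, n):
--     # Flatten to (parent, child) arcs, sort them once globally, then sweep the
--     # sorted arc list run by run: each run of equal parents is one finished,
--     # already-sorted bucket, written into the pre-initialised table in one go.
--     arcs = sorted((head[d], d) for d in head if d > 0)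
--     deps = {j: [] for j in range(n + 1)}
--     k = 0
--     while k < len(arcs):
--         h = arcs[k][0]
--         m = k
--         while m < len(arcs) and arcs[m][0] == h:
--             m += 1
--         deps[h].extend(d for _, d in arcs[k:m])
--         k = m
--     return deps
-- ===== Notes on version B (the rewrite author's own statement) =====
-- stated objective: alternative
-- what changed: A groups incrementally into per-node sets (init a set per node, one pass mutating deps[head[i]], then sort every bucket separately); B flattens head into a (parent, child) arc list, sorts it once lexicographically, and sweeps the sorted list run by run, writing each run of equal parents into the pre-initialised table as one already-sorted bucket.
import Mathlib
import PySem

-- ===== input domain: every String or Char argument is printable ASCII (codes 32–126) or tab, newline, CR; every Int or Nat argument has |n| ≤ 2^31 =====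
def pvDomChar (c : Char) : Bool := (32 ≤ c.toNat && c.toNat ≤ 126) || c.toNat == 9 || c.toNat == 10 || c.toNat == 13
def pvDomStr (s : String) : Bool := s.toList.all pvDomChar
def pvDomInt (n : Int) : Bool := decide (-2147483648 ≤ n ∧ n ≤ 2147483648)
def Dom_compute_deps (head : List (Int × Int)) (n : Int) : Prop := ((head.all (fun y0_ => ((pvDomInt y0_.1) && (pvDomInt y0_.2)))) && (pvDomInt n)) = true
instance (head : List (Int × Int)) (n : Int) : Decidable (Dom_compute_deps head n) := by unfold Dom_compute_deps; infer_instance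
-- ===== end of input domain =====

-- B replaces A's incremental grouping (a set per node, mutate deps[head[i]], then
-- sort every bucket) by one global lexicographic sort of the (parent, child) arc
-- list followed by a run-by-run sweep that writes each run of equal parents into
-- the pre-initialised table as one already-sorted bucket (objective: alternative).
-- head is a Python dict (ported as PySem.Dict built from the association list).

-- ===== PORT A =====
def compute_deps (head : List (Int × Int)) (n : Int) : List (Int × List Int) :=
  let hd := PySem.Dict.ofList head
  let deps0 : PySem.Dict Int (List Int) :=
    (PySem.List.pyRange 0 (n + 1)).foldl
      (fun d i => d.insert i (PySem.Set.ofList [])) PySem.Dict.empty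
  let deps1 := hd.keys.foldl
    (fun d i =>
      if 0 < i then
        let j := hd.getD i 0          -- head[i]: i is a key of head, so getD is exact
        d.insert j (PySem.Set.add (d.getD j []) i)   -- deps[j].add(i); Pre_ makes j a key
      else d) deps0
  let deps2 := deps1.keys.foldl
    (fun d i => d.insert i (PySem.List.sorted (d.getD i []) (fun x => x) false)) deps1
  deps2.items

-- ===== PORT B =====
-- inner while loop of Source B: first index m' ≥ m with arcs[m'][0] ≠ h (or len(arcs));
-- fuel is termination bookkeeping only (call sites pass arcs.length - m, always enough)
def pvInner (arcs : List (Int × Int)) (h : Int) (fuel m : Nat) : Nat :=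
  match fuel with
  | 0 => m
  | fuel + 1 =>
      if hm : m < arcs.length then
        if arcs[m].1 = h then pvInner arcs h fuel (m + 1) else m
      else m

-- outer while loop of Source B: consume the run [k, pvInner …) and write its bucket;
-- fuel is termination bookkeeping only (arcs.length bounds the number of runs)
def pvScan (arcs : List (Int × Int)) (deps : PySem.Dict Int (List Int)) (fuel k : Nat) :
    PySem.Dict Int (List Int) :=
  match fuel with
  | 0 => deps
  | fuel + 1 =>
      if hk : k < arcs.length then
        let h := arcs[k].1
        let m := pvInner arcs h (arcs.length - k) k
        -- deps[h].extend(d for _, d in arcs[k:m]): in-place extension of the list at an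
        -- existing key = overwrite-in-place insert of the appended list (exact; arcs[k:m]
        -- with 0 ≤ k ≤ m ≤ len is (drop k).take (m - k))
        pvScan arcs (deps.insert h (deps.getD h [] ++ ((arcs.drop k).take (m - k)).map Prod.snd)) fuel m
      else deps

def compute_deps_alt (head : List (Int × Int)) (n : Int) : List (Int × List Int) :=
  let hd := PySem.Dict.ofList head
  -- sorted((head[d], d) for d in head if d > 0): getD is exact (d is a key of head);
  -- plain sorted on int pairs compares lexicographically = PySem.List.sorted2 fst snd
  let arcs := PySem.List.sorted2
    ((hd.keys.filter (fun d => decide (0 < d))).map (fun d => (hd.getD d 0, d)))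
    Prod.fst Prod.snd
  let deps0 : PySem.Dict Int (List Int) :=
    (PySem.List.pyRange 0 (n + 1)).foldl
      (fun d j => d.insert j ([] : List Int)) PySem.Dict.empty
  (pvScan arcs deps0 arcs.length 0).items

-- ===== PRECONDITION & SPEC =====
-- A raises KeyError when some key i > 0 of head has head[i] outside 0..n
-- (deps[head[i]] on a missing bucket; B's sweep raises there too); Pre_ excludes
-- exactly those inputs.
def Pre_compute_deps (head : List (Int × Int)) (n : Int) : Prop :=
  ∀ p ∈ (PySem.Dict.ofList head).items, 0 < p.1 → 0 ≤ p.2 ∧ p.2 ≤ n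
instance (head : List (Int × Int)) (n : Int) : Decidable (Pre_compute_deps head n) := by
  unfold Pre_compute_deps; infer_instance
def pvWitness_compute_deps : (List (Int × Int)) × Int := ([(1, 0), (2, 1), (3, 1)], 3)

def Spec_compute_deps (head : List (Int × Int)) (n : Int) (out : List (Int × List Int)) : Prop := out = compute_deps_alt head n
instance (head : List (Int × Int)) (n : Int) (out : List (Int × List Int)) : Decidable (Spec_compute_deps head n out) := by unfold Spec_compute_deps; infer_instance

-- ===== CLAIM (what is proved, stated in full; the proofs are below) =====
def Claim_equal_compute_deps : Prop := ∀ (head : List (Int × Int)) (n : Int), Dom_compute_deps head n → Pre_compute_deps head n → Spec_compute_deps head n (compute_deps head n)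

-- ===== LEMMAS AND PROOFS =====

-- the range [0..n] has no duplicates
lemma pv_nodup_pyRange (a b : Int) : (PySem.List.pyRange a b).Nodup := by
  simp only [PySem.List.pyRange]
  split
  · exact List.nodup_nil
  · exact List.Nodup.map (fun x y h => by omega) List.nodup_range

-- the initial fold: all values stay []
lemma pv_getD_init (l : List Int) (d : PySem.Dict Int (List Int))
    (h : ∀ k, d.getD k [] = []) (k : Int) :
    (l.foldl (fun d i => d.insert i ([] : List Int)) d).getD k [] = [] := by
  induction l generalizing d with
  | nil => exact h k
  | cons i t ih =>
      refine ih _ (fun k' => ?_)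
      rw [PySem.Dict.getD_insert]
      split <;> simp [h]

-- the initial fold: items are the range paired with []
lemma pv_items_init (n : Int) :
    ((PySem.List.pyRange 0 (n + 1)).foldl
      (fun d i => d.insert i ([] : List Int)) PySem.Dict.empty).items
      = (PySem.List.pyRange 0 (n + 1)).map (fun i => (i, ([] : List Int))) := by
  have := PySem.Dict.items_foldl_insert_fresh (PySem.List.pyRange 0 (n + 1))
    (fun i => i) (fun _ => ([] : List Int)) PySem.Dict.empty
    (fun a _ => PySem.Dict.contains_empty a)
    (by simpa using pv_nodup_pyRange 0 (n + 1))
  simpa [PySem.Dict.empty] using this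

-- keys are unchanged by any guarded insert loop whose keys are already present
lemma pv_keys_loop (p : Int → Prop) [DecidablePred p] (key : Int → Int)
    (g : PySem.Dict Int (List Int) → Int → List Int)
    (l : List Int) (d : PySem.Dict Int (List Int))
    (h : ∀ i ∈ l, p i → key i ∈ d.keys) :
    (l.foldl (fun d i => if p i then d.insert (key i) (g d i) else d) d).keys = d.keys := by
  induction l generalizing d with
  | nil => rfl
  | cons i t ih =>
      by_cases hp : p i
      · have hc : d.contains (key i) = true :=
          (PySem.Dict.contains_iff_mem_keys d (key i)).2 (h i (by simp) hp)
        have hk := PySem.Dict.keys_insert_of_contains d (g d i) hc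
        simp only [List.foldl_cons, if_pos hp]
        rw [ih _ (fun j hj hpj => by rw [hk]; exact h j (by simp [hj]) hpj), hk]
      · simp only [List.foldl_cons, if_neg hp]
        exact ih _ (fun j hj hpj => h j (by simp [hj]) hpj)

-- A's accumulation loop: each bucket collects, in traversal order, the i > 0 with f i = k
lemma pv_getD_Aloop (f : Int → Int) (l : List Int) (d : PySem.Dict Int (List Int))
    (hl : l.Nodup) (hfresh : ∀ k x, x ∈ d.getD k [] → x ∉ l) (k : Int) :
    (l.foldl (fun d i =>
        if 0 < i then d.insert (f i) (PySem.Set.add (d.getD (f i) []) i) else d) d).getD k []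
      = d.getD k [] ++ l.filter (fun i => decide (0 < i) && decide (f i = k)) := by
  induction l generalizing d with
  | nil => simp
  | cons i t ih =>
      rcases List.nodup_cons.1 hl with ⟨hit, hts⟩
      by_cases hp : 0 < i
      · have hni : i ∉ d.getD (f i) [] := fun hmem => (hfresh (f i) i hmem) (by simp)
        have hadd : PySem.Set.add (d.getD (f i) []) i = d.getD (f i) [] ++ [i] := by
          simp [PySem.Set.add, hni]
        simp only [List.foldl_cons, if_pos hp, hadd]
        rw [ih _ hts ?fresh]
        case fresh =>
          intro k' x hx
          rw [PySem.Dict.getD_insert] at hx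
          split at hx
          · rcases List.mem_append.1 hx with h1 | h1
            · exact fun ht => (hfresh (f i) x h1) (by simp [ht])
            · simp at h1; subst h1; exact hit
          · exact fun ht => (hfresh k' x hx) (by simp [ht])
        rw [PySem.Dict.getD_insert]
        by_cases hk : k = f i
        · subst hk
          simp [hp, List.append_assoc]
        · have : ¬ (f i = k) := fun h => hk h.symm
          simp [this, hk]
      · simp only [List.foldl_cons, if_neg hp]
        rw [ih _ hts (fun k' x hx ht => (hfresh k' x hx) (by simp [ht]))]
        simp [hp]

-- A's final pass sorts each bucket in place
lemma pv_getD_sortpass (l : List Int) (d : PySem.Dict Int (List Int))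
    (hl : l.Nodup) (k : Int) :
    (l.foldl (fun d i => d.insert i (PySem.List.sorted (d.getD i []) (fun x => x) false)) d).getD k []
      = if k ∈ l then PySem.List.sorted (d.getD k []) (fun x => x) false else d.getD k [] := by
  induction l generalizing d with
  | nil => simp
  | cons i t ih =>
      rcases List.nodup_cons.1 hl with ⟨hit, hts⟩
      simp only [List.foldl_cons]
      rw [ih _ hts]
      by_cases hk : k ∈ t
      · have hki : k ≠ i := fun h => hit (h ▸ hk)
        rw [PySem.Dict.getD_insert]
        simp [hk, hki]
      · rw [PySem.Dict.getD_insert]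
        by_cases hki : k = i
        · subst hki; simp [hk]
        · simp [hk, hki]

-- keys are unchanged by an unguarded insert loop over existing keys
lemma pv_keys_sortpass (g : PySem.Dict Int (List Int) → Int → List Int)
    (l : List Int) (d : PySem.Dict Int (List Int))
    (h : ∀ i ∈ l, i ∈ d.keys) :
    (l.foldl (fun d i => d.insert i (g d i)) d).keys = d.keys := by
  induction l generalizing d with
  | nil => rfl
  | cons i t ih =>
      have hc : d.contains i = true :=
        (PySem.Dict.contains_iff_mem_keys d i).2 (h i (by simp))
      have hk := PySem.Dict.keys_insert_of_contains d (g d i) hc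
      simp only [List.foldl_cons]
      rw [ih _ (fun j hj => by rw [hk]; exact h j (by simp [hj])), hk]

-- Python's lexicographic strict comparison on int pairs (the comparator sorted2 uses)
def pvLt (a b : Int × Int) : Bool :=
  decide (a.1 < b.1) || (!decide (b.1 < a.1) && decide (a.2 < b.2))

lemma pvLt_iff (a b : Int × Int) :
    pvLt a b = true ↔ (a.1 < b.1 ∨ (a.1 ≤ b.1 ∧ a.2 < b.2)) := by
  simp [pvLt]

lemma pv_sorted2_eq (xs : List (Int × Int)) :
    PySem.List.sorted2 xs Prod.fst Prod.snd false
      = xs.foldl (fun acc x => PySem.List.insertBy pvLt x acc) [] := rfl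

-- inserting into a lex-sorted list keeps it lex-sorted
lemma pv_insertBy_pairwise (x : Int × Int) (l : List (Int × Int))
    (hl : l.Pairwise (fun a b => pvLt b a = false)) :
    (PySem.List.insertBy pvLt x l).Pairwise (fun a b => pvLt b a = false) := by
  induction l with
  | nil => simp [PySem.List.insertBy]
  | cons y ys ih =>
      rcases List.pairwise_cons.1 hl with ⟨hy, hys⟩
      by_cases hb : pvLt x y = true
      · rw [PySem.List.insertBy, if_pos hb]
        refine List.pairwise_cons.2 ⟨?_, hl⟩
        intro z hz
        rcases List.mem_cons.1 hz with h1 | h1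
        · subst h1
          rw [pvLt_iff] at hb
          rw [Bool.eq_false_iff, Ne, pvLt_iff]; omega
        · have hzy := hy z h1
          rw [pvLt_iff] at hb
          rw [Bool.eq_false_iff, Ne, pvLt_iff] at hzy ⊢; omega
      · rw [PySem.List.insertBy, if_neg hb]
        refine List.pairwise_cons.2 ⟨?_, ih hys⟩
        intro z hz
        rw [PySem.List.mem_insertBy] at hz
        rcases hz with h1 | h1
        · subst h1; exact Bool.eq_false_iff.2 hb
        · exact hy z h1

-- sorted2 by (fst, snd) is pairwise lex-nondecreasing
lemma pv_sorted2_pairwise (xs : List (Int × Int)) :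
    (PySem.List.sorted2 xs Prod.fst Prod.snd false).Pairwise (fun a b => pvLt b a = false) := by
  rw [pv_sorted2_eq]
  have : ∀ (l : List (Int × Int)) (acc : List (Int × Int)),
      acc.Pairwise (fun a b => pvLt b a = false) →
      (l.foldl (fun acc x => PySem.List.insertBy pvLt x acc) acc).Pairwise
        (fun a b => pvLt b a = false) := by
    intro l
    induction l with
    | nil => exact fun acc h => h
    | cons x t ih => exact fun acc h => ih _ (pv_insertBy_pairwise x acc h)
  exact this xs [] (by simp)

-- per-pair grouping fold: each bucket collects, in order, the snd of pairs with fst = k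
lemma pv_fold_pairs_getD (l : List (Int × Int)) (d : PySem.Dict Int (List Int)) (k : Int) :
    (l.foldl (fun d p => d.insert p.1 (d.getD p.1 [] ++ [p.2])) d).getD k []
      = d.getD k [] ++ (l.filter (fun p => decide (p.1 = k))).map Prod.snd := by
  induction l generalizing d with
  | nil => simp
  | cons q t ih =>
      simp only [List.foldl_cons]
      rw [ih]
      rw [PySem.Dict.getD_insert]
      by_cases hk : k = q.1
      · subst hk; simp [List.append_assoc]
      · have : ¬ (q.1 = k) := fun h => hk h.symm
        simp [this, hk]

-- per-pair grouping fold: keys are unchanged when every fst is already a key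
lemma pv_fold_pairs_keys (l : List (Int × Int)) (d : PySem.Dict Int (List Int))
    (h : ∀ p ∈ l, p.1 ∈ d.keys) :
    (l.foldl (fun d p => d.insert p.1 (d.getD p.1 [] ++ [p.2])) d).keys = d.keys := by
  induction l generalizing d with
  | nil => rfl
  | cons q t ih =>
      have hc : d.contains q.1 = true :=
        (PySem.Dict.contains_iff_mem_keys d q.1).2 (h q (by simp))
      have hk := PySem.Dict.keys_insert_of_contains d (d.getD q.1 [] ++ [q.2]) hc
      simp only [List.foldl_cons]
      rw [ih _ (fun p hp => by rw [hk]; exact h p (by simp [hp])), hk]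

-- a run of pairs with constant fst, folded pair by pair onto an insert
lemma pv_run_fold (h : Int) (t : List (Int × Int)) (v : List Int)
    (d : PySem.Dict Int (List Int)) (hall : ∀ p ∈ t, p.1 = h) :
    t.foldl (fun d p => d.insert p.1 (d.getD p.1 [] ++ [p.2])) (d.insert h v)
      = d.insert h (v ++ t.map Prod.snd) := by
  induction t generalizing v with
  | nil => simp
  | cons q t ih =>
      have hq : q.1 = h := hall q (by simp)
      simp only [List.foldl_cons, hq, PySem.Dict.getD_insert_self,
        PySem.Dict.insert_insert_self]
      rw [ih (v ++ [q.2]) (fun p hp => hall p (by simp [hp]))]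
      simp [List.append_assoc]

-- the same, from a bare dict, for a nonempty constant-fst run
lemma pv_run_fold' (h : Int) (run : List (Int × Int)) (d : PySem.Dict Int (List Int))
    (hne : run ≠ []) (hall : ∀ p ∈ run, p.1 = h) :
    run.foldl (fun d p => d.insert p.1 (d.getD p.1 [] ++ [p.2])) d
      = d.insert h (d.getD h [] ++ run.map Prod.snd) := by
  cases run with
  | nil => exact absurd rfl hne
  | cons q t =>
      have hq : q.1 = h := hall q (by simp)
      simp only [List.foldl_cons, hq]
      rw [pv_run_fold h t (d.getD h [] ++ [q.2]) d (fun p hp => hall p (by simp [hp]))]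
      simp [List.append_assoc]

-- the run sweep IS the per-pair grouping fold over the remaining arcs
lemma pvInner_ge (arcs : List (Int × Int)) (h : Int) (fuel m : Nat) :
    m ≤ pvInner arcs h fuel m := by
  induction fuel generalizing m with
  | zero => simp [pvInner]
  | succ fuel ih =>
      rw [pvInner]
      split
      · split
        · exact le_trans (by omega) (ih (m + 1))
        · exact le_refl m
      · exact le_refl m

lemma pvInner_le (arcs : List (Int × Int)) (h : Int) (fuel m : Nat) (hle : m ≤ arcs.length) :
    pvInner arcs h fuel m ≤ arcs.length := by
  induction fuel generalizing m with
  | zero => simpa [pvInner] using hle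
  | succ fuel ih =>
      rw [pvInner]
      split
      · split
        · exact ih (m + 1) (by omega)
        · exact hle
      · exact hle

lemma pvInner_gt (arcs : List (Int × Int)) (h : Int) (fuel m : Nat) (hf : 0 < fuel)
    (hm : m < arcs.length) (heq : arcs[m].1 = h) : m < pvInner arcs h fuel m := by
  obtain ⟨fuel, rfl⟩ : ∃ f, fuel = f + 1 := ⟨fuel - 1, by omega⟩
  rw [pvInner, dif_pos hm, if_pos heq]
  have := pvInner_ge arcs h fuel (m + 1); omega

lemma pvInner_run (arcs : List (Int × Int)) (h : Int) (fuel m : Nat) :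
    ∀ j (hj : j < arcs.length), m ≤ j → j < pvInner arcs h fuel m → arcs[j].1 = h := by
  induction fuel generalizing m with
  | zero => intro j hj h1 h2; rw [pvInner] at h2; omega
  | succ fuel ih =>
      intro j hj h1 h2
      rw [pvInner] at h2
      by_cases hm : m < arcs.length
      · rw [dif_pos hm] at h2
        by_cases heq : arcs[m].1 = h
        · rw [if_pos heq] at h2
          rcases Nat.eq_or_lt_of_le h1 with h3 | h3
          · subst h3; exact heq
          · exact ih (m + 1) j hj h3 h2
        · rw [if_neg heq] at h2; omega
      · rw [dif_neg hm] at h2; omega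

-- the run sweep IS the per-pair grouping fold over the remaining arcs
lemma pv_scan_eq_fold (arcs : List (Int × Int)) (fuel : Nat) :
    ∀ (deps : PySem.Dict Int (List Int)) (k : Nat), arcs.length - k ≤ fuel →
    pvScan arcs deps fuel k
      = (arcs.drop k).foldl (fun d p => d.insert p.1 (d.getD p.1 [] ++ [p.2])) deps := by
  induction fuel with
  | zero =>
      intro deps k hf
      rw [pvScan, List.drop_of_length_le (by omega)]
      rfl
  | succ fuel ih =>
      intro deps k hf
      by_cases hk : k < arcs.length
      · rw [pvScan, dif_pos hk]
        show pvScan arcs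
          (deps.insert (arcs[k].1) (deps.getD (arcs[k].1) [] ++
            ((arcs.drop k).take (pvInner arcs (arcs[k].1) (arcs.length - k) k - k)).map Prod.snd))
          fuel (pvInner arcs (arcs[k].1) (arcs.length - k) k) = _
        set h := arcs[k].1 with hh
        set m := pvInner arcs h (arcs.length - k) k with hm
        have hkm : k < m := pvInner_gt arcs h (arcs.length - k) k (by omega) hk rfl
        have hml : m ≤ arcs.length := pvInner_le arcs h (arcs.length - k) k (by omega)
        set run := (arcs.drop k).take (m - k) with hrun
        have hlenrun : run.length = m - k := by
          rw [hrun, List.length_take, List.length_drop]; omega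
        have hallrun : ∀ p ∈ run, p.1 = h := by
          intro p hp
          obtain ⟨i, hi, hpi⟩ := List.mem_iff_getElem.1 hp
          have hi3 : k + i < arcs.length := by omega
          have : run[i] = arcs[k + i] := by
            simp only [hrun, List.getElem_take, List.getElem_drop]
          rw [← hpi, this]
          exact pvInner_run arcs h (arcs.length - k) k (k + i) hi3 (by omega) (by omega)
        have hne : run ≠ [] := by
          intro habs; rw [habs] at hlenrun; simp at hlenrun; omega
        have hsplit : arcs.drop k = run ++ arcs.drop m := by
          have h1 := List.take_append_drop (m - k) (arcs.drop k)
          rw [List.drop_drop] at h1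
          have h2 : k + (m - k) = m := by omega
          rw [h2] at h1
          exact h1.symm
        rw [ih _ m (by omega), hsplit, List.foldl_append,
          pv_run_fold' h run deps hne hallrun]
      · rw [pvScan, dif_neg hk, List.drop_of_length_le (by omega)]
        rfl

-- the strict snd-order inside one fst-class of the lex-sorted arc list
lemma pv_bucket_pairwise (arcs : List (Int × Int)) (k : Int)
    (hPB : arcs.Pairwise (fun a b => pvLt b a = false))
    (hnd : ((arcs.filter (fun p => decide (p.1 = k))).map Prod.snd).Nodup) :
    ((arcs.filter (fun p => decide (p.1 = k))).map Prod.snd).Pairwise (· < ·) := by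
  set l := arcs.filter (fun p => decide (p.1 = k)) with hl
  have hmem : ∀ p ∈ l, p.1 = k := by
    intro p hp
    have := (List.mem_filter.1 hp).2
    simpa using this
  have hPBl : l.Pairwise (fun a b => pvLt b a = false) := hPB.filter _
  have hne : l.Pairwise (fun a b => a.2 ≠ b.2) := List.pairwise_map.1 hnd
  refine List.pairwise_map.2 ?_
  refine (hPBl.and hne).imp_of_mem ?_
  intro a b ha hb hab
  rcases hab with ⟨h1, h2⟩
  have ha1 := hmem a ha
  have hb1 := hmem b hb
  rw [Bool.eq_false_iff, Ne, pvLt_iff] at h1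
  omega

-- ===== VERDICT (by name: the statement is the Claim_ definition above) =====
theorem compute_deps_spec : Claim_equal_compute_deps := by
  intro head n _ hpre
  unfold Spec_compute_deps
  simp only [compute_deps, compute_deps_alt]
  set hd := PySem.Dict.ofList head with hhd
  have hKnd : hd.keys.Nodup := PySem.Dict.nodup_keys_ofList head
  set K := hd.keys with hK
  set R := PySem.List.pyRange 0 (n + 1) with hR
  have hRnd : R.Nodup := pv_nodup_pyRange 0 (n + 1)
  set D0 : PySem.Dict Int (List Int) :=
    R.foldl (fun d i => d.insert i ([] : List Int)) PySem.Dict.empty with hD0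
  have hAinit : (R.foldl (fun d i => d.insert i (PySem.Set.ofList [])) PySem.Dict.empty) = D0 := rfl
  rw [hAinit]
  have hD0getD : ∀ k, D0.getD k [] = [] := fun k => pv_getD_init R _ (by simp) k
  have hD0items : D0.items = R.map (fun i => (i, ([] : List Int))) := pv_items_init n
  have hD0keys : D0.keys = R := by
    have h1 : ((fun x : Int × List Int => x.1) ∘ fun i : Int => (i, ([] : List Int))) = id := rfl
    simp only [PySem.Dict.keys, hD0items, List.map_map, h1, List.map_id]
  -- the head value of every positive key lies in 0..n, hence in R
  have hj : ∀ i ∈ K, 0 < i → hd.getD i 0 ∈ R := by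
    intro i hi hpos
    obtain ⟨v, hm⟩ : ∃ v, (i, v) ∈ hd.items := by simpa [hK, PySem.Dict.keys] using hi
    have hv : hd.getD i 0 = v := PySem.Dict.getD_of_mem_items hd hm hKnd 0
    have hb := hpre (i, v) hm hpos
    rw [hR, PySem.List.mem_pyRange_one, hv]
    omega
  -- A's accumulation loop
  set dA : PySem.Dict Int (List Int) := K.foldl
    (fun d i => if 0 < i then d.insert (hd.getD i 0) (PySem.Set.add (d.getD (hd.getD i 0) []) i) else d)
    D0 with hdA
  have hdAkeys : dA.keys = R := by
    rw [hdA, pv_keys_loop (fun i => 0 < i) (fun i => hd.getD i 0) _ K D0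
      (fun i hi hpos => by rw [hD0keys]; exact hj i hi hpos), hD0keys]
  have hdAgetD : ∀ k, dA.getD k [] =
      K.filter (fun i => decide (0 < i) && decide (hd.getD i 0 = k)) := by
    intro k
    rw [hdA, pv_getD_Aloop (fun i => hd.getD i 0) K D0 hKnd
      (fun k' x hx => by rw [hD0getD k'] at hx; cases hx), hD0getD]
    simp
  -- A's sort pass
  set dA2 : PySem.Dict Int (List Int) := dA.keys.foldl
    (fun d i => d.insert i (PySem.List.sorted (d.getD i []) (fun x => x) false)) dA with hdA2
  have hdA2keys : dA2.keys = R := by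
    rw [hdA2, pv_keys_sortpass _ dA.keys dA (fun i hi => hi), hdAkeys]
  have hdA2getD : ∀ k ∈ R, dA2.getD k [] =
      PySem.List.sorted (K.filter (fun i => decide (0 < i) && decide (hd.getD i 0 = k))) (fun x => x) false := by
    intro k hk
    rw [hdA2, pv_getD_sortpass dA.keys dA (by rw [hdAkeys]; exact hRnd) k]
    rw [hdAkeys, if_pos hk, hdAgetD]
  -- B's arc list
  set arcs0 : List (Int × Int) :=
    (K.filter (fun d => decide (0 < d))).map (fun d => (hd.getD d 0, d)) with harcs0
  set arcs : List (Int × Int) := PySem.List.sorted2 arcs0 Prod.fst Prod.snd with harcs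
  have hperm : arcs.Perm arcs0 := PySem.List.sorted2_perm arcs0 Prod.fst Prod.snd false
  have harcmem : ∀ p ∈ arcs, p.1 ∈ R := by
    intro p hp
    have hp0 : p ∈ arcs0 := hperm.mem_iff.1 hp
    obtain ⟨d, hdmem, rfl⟩ := List.mem_map.1 hp0
    have := List.mem_filter.1 hdmem
    exact hj d this.1 (by simpa using this.2)
  -- B's sweep = the per-pair grouping fold over arcs
  set dB : PySem.Dict Int (List Int) := pvScan arcs D0 arcs.length 0 with hdB
  have hdBfold : dB = arcs.foldl (fun d p => d.insert p.1 (d.getD p.1 [] ++ [p.2])) D0 := by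
    rw [hdB, pv_scan_eq_fold arcs arcs.length D0 0 (by omega), List.drop_zero]
  have hdBkeys : dB.keys = R := by
    rw [hdBfold, pv_fold_pairs_keys arcs D0 (fun p hp => by rw [hD0keys]; exact harcmem p hp),
      hD0keys]
  have hdBgetD : ∀ k, dB.getD k [] =
      (arcs.filter (fun p => decide (p.1 = k))).map Prod.snd := by
    intro k
    rw [hdBfold, pv_fold_pairs_getD, hD0getD]
    simp
  -- snd of the arcs is the filtered key list (no duplicates)
  have hsnd0 : arcs0.map Prod.snd = K.filter (fun d => decide (0 < d)) := by
    rw [harcs0, List.map_map]; exact List.map_id _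
  have hsndnd : (arcs.map Prod.snd).Nodup := by
    have h1 : (arcs.map Prod.snd).Perm (arcs0.map Prod.snd) := hperm.map Prod.snd
    rw [hsnd0] at h1
    exact h1.nodup_iff.2 (hKnd.filter _)
  -- items of both are the range paired with equal bucket values
  rw [PySem.Dict.items_eq_map_keys dA2 (by rw [hdA2keys]; exact hRnd) [],
      PySem.Dict.items_eq_map_keys dB (by rw [hdBkeys]; exact hRnd) [],
      hdA2keys, hdBkeys]
  refine List.map_congr_left (fun k hk => ?_)
  rw [hdA2getD k hk, hdBgetD k]
  refine congrArg (fun v => ((k : Int), v)) ?_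
  -- bucket equality: sort-of-filter (A) = snd of the fst-class of the lex sort (B)
  apply PySem.List.sorted_eq_of_perm_of_pairwise_lt
  · -- permutation with the A-side filtered key list
    have h1 : ((arcs.filter (fun p => decide (p.1 = k))).map Prod.snd).Perm
        ((arcs0.filter (fun p => decide (p.1 = k))).map Prod.snd) :=
      (hperm.filter _).map _
    have h2 : (arcs0.filter (fun p => decide (p.1 = k))).map Prod.snd
        = K.filter (fun i => decide (0 < i) && decide (hd.getD i 0 = k)) := by
      rw [harcs0, List.filter_map, List.map_map]
      have hcomp : (Prod.snd ∘ fun d : Int => (hd.getD d 0, d)) = id := rfl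
      rw [hcomp, List.map_id, List.filter_filter]
      exact List.filter_congr (fun a _ => Bool.and_comm _ _)
    rw [h2] at h1
    exact h1
  · -- strictly increasing
    exact pv_bucket_pairwise arcs k (by rw [harcs]; exact pv_sorted2_pairwise arcs0)
      (hsndnd.sublist (List.filter_sublist.map Prod.snd))
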